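-- pv_equiv track=rewrite | github.com/Loupau38/shapez-2-tools | TMAM macro/blueprints.py | getPotentialBPCodesInString
-- ===== SOURCE A (Python) =====
-- PREFIX = "SHAPEZ2"
--
-- SUFFIX = "$"
--
-- def getPotentialBPCodesInString(string:str) -> list[str]:
--
--     if PREFIX not in string:
--         return []
--
--     bps = string.split(PREFIX)[1:]
--
--     bpCodes = []
--
--     for bp in bps:
--
--         if SUFFIX not in bp:
--             continue
--
--         bp = bp.split(SUFFIX)[0]
--
--         bpCodes.append(PREFIX+bp+SUFFIX)
--
--     return bpCodes
-- ===== SOURCE B (Python) =====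
-- PREFIX = "SHAPEZ2"
--
-- SUFFIX = "$"
--
-- def getPotentialBPCodesInString(string):
--     # single left-to-right pass (state machine) instead of split-and-rescan
--     codes = []
--     collecting = False
--     buf = ""
--     i = 0
--     n = len(string)
--     while i < n:
--         if string.startswith(PREFIX, i):
--             collecting = True
--             buf = ""
--             i += len(PREFIX)
--         elif collecting and string[i] == SUFFIX:
--             codes.append(PREFIX + buf + SUFFIX)
--             collecting = False
--             buf = ""
--             i += 1
--         else:
--             if collecting:
--                 buf += string[i]
--             i += 1
--     return codes
-- ===== Notes on version B (the rewrite author's own statement) =====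
-- stated objective: simpler
-- what changed: Replaced the double split (split at every PREFIX, then split each chunk at SUFFIX) and the chunk loop by a single left-to-right state-machine pass that collects characters after a PREFIX and emits a code at the first SUFFIX.
import Mathlib
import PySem

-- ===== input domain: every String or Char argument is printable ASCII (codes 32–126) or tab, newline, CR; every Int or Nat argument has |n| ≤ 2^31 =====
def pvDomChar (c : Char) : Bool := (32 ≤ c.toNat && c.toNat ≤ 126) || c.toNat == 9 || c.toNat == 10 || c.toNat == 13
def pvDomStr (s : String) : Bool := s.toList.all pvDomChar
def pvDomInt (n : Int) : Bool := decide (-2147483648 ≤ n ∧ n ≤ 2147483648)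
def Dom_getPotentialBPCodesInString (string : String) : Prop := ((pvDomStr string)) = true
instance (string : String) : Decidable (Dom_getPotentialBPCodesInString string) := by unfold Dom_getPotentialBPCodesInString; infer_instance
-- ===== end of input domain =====

-- B replaces A's split-at-every-PREFIX / re-split-at-SUFFIX passes by one left-to-right
-- state-machine pass over the characters (objective: simpler, same behaviour).

-- module constants shared by both Python versions
def pvPrefix : List Char := "SHAPEZ2".toList
def pvSuffix : List Char := "$".toList

-- ===== PORT A =====
def getPotentialBPCodesInString (string : String) : List String :=
  if PySem.Chars.isIn pvPrefix string.toList = false then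
    []
  else
    (PySem.List.slice (PySem.Chars.splitOn string.toList pvPrefix) (some 1) none).foldl
      (fun bpCodes bp =>
        if PySem.Chars.isIn pvSuffix bp = false then bpCodes
        else
          -- str.split always returns a nonempty list, so the Python [0] is its head
          bpCodes ++ [String.ofList (pvPrefix ++ (PySem.Chars.splitOn bp pvSuffix).headD [] ++ pvSuffix)])
      []

-- ===== PORT B =====
-- Source B's while loop over index i, as structural recursion over the remaining characters;
-- state = (collecting, buf) exactly as in Source B
def pvScan : List Char → Bool → List Char → List String
  | [], _, _ => []
  | c :: rest, collecting, buf =>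
    if pvPrefix.isPrefixOf (c :: rest) then
      pvScan ((c :: rest).drop pvPrefix.length) true []
    else if collecting && (c == '$') then
      String.ofList (pvPrefix ++ buf ++ pvSuffix) :: pvScan rest false []
    else
      pvScan rest collecting (if collecting then buf ++ [c] else buf)
termination_by s => s.length
decreasing_by
  · simp [pvPrefix]
  · simp
  · simp

def getPotentialBPCodesInString_alt (string : String) : List String :=
  pvScan string.toList false []

-- ===== PRECONDITION & SPEC =====
def Spec_getPotentialBPCodesInString (string : String) (out : List String) : Prop := out = getPotentialBPCodesInString_alt string
instance (string : String) (out : List String) : Decidable (Spec_getPotentialBPCodesInString string out) := by unfold Spec_getPotentialBPCodesInString; infer_instance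

-- ===== CLAIM (what is proved, stated in full; the proofs are below) =====
def Claim_equal_getPotentialBPCodesInString : Prop := ∀ (string : String), Dom_getPotentialBPCodesInString string → Spec_getPotentialBPCodesInString string (getPotentialBPCodesInString string)

-- ===== LEMMAS AND PROOFS =====

-- reference form of Python's str.split(sep) for nonempty sep (left-to-right, non-overlapping)
def pvChunks (sep : List Char) : List Char → List (List Char)
  | [] => [[]]
  | c :: rest =>
    if sep ≠ [] ∧ sep.isPrefixOf (c :: rest) then
      [] :: pvChunks sep ((c :: rest).drop sep.length)
    else
      match pvChunks sep rest with
      | [] => [[c]]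
      | p :: ps => (c :: p) :: ps
termination_by l => l.length
decreasing_by
  · rename_i h
    have h1 : 0 < sep.length := List.length_pos_of_ne_nil h.1
    simp; omega
  · simp

lemma pvChunks_ne_nil (sep l) : pvChunks sep l ≠ [] := by
  cases l with
  | nil => simp [pvChunks]
  | cons c rest =>
    rw [pvChunks]
    split
    · simp
    · split <;> simp

-- the codes produced from the chunks after the first one
def pvG : List (List Char) → List String
  | [] => []
  | bp :: rest =>
    (if '$' ∈ bp then [String.ofList (pvPrefix ++ bp.takeWhile (· ≠ '$') ++ pvSuffix)] else []) ++ pvG rest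

def pvConsCur (cur : List Char) : List (List Char) → List (List Char)
  | [] => [cur.reverse]
  | p :: ps => (cur.reverse ++ p) :: ps

lemma pvGo_spec (sep : List Char) (hsep : sep ≠ []) :
    ∀ fuel l cur acc, l.length < fuel →
      PySem.Chars.splitOn.go sep fuel l cur acc = acc.reverse ++ pvConsCur cur (pvChunks sep l) := by
  intro fuel
  induction fuel with
  | zero => intro l cur acc h; omega
  | succ n ih =>
    intro l cur acc h
    cases l with
    | nil =>
      rw [PySem.Chars.splitOn.go.eq_2 _ _ _ _ (by omega)]
      simp [pvChunks, pvConsCur]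
    | cons c rest =>
      rw [PySem.Chars.splitOn.go.eq_3, pvChunks]
      by_cases hp : sep.isPrefixOf (c :: rest) = true
      · rw [if_pos hp, if_pos ⟨hsep, hp⟩]
        rw [ih _ _ _ (by have h1 := List.length_pos_of_ne_nil hsep; simp at h ⊢; omega)]
        cases hr : pvChunks sep ((c :: rest).drop sep.length) with
        | nil => exact absurd hr (pvChunks_ne_nil _ _)
        | cons p ps => simp [pvConsCur]
      · rw [if_neg hp, if_neg (fun hh => hp hh.2)]
        rw [ih _ _ _ (by simp at h ⊢; omega)]
        cases hr : pvChunks sep rest with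
        | nil => exact absurd hr (pvChunks_ne_nil _ _)
        | cons p ps => simp [pvConsCur]

lemma pvSplitOn_eq (sep : List Char) (hsep : sep ≠ []) (l : List Char) :
    PySem.Chars.splitOn l sep = pvChunks sep l := by
  unfold PySem.Chars.splitOn
  rw [pvGo_spec sep hsep _ _ _ _ (by omega)]
  cases hr : pvChunks sep l with
  | nil => exact absurd hr (pvChunks_ne_nil _ _)
  | cons p ps => simp [pvConsCur]

lemma pvChunks_head_suffix (bp : List Char) :
    (pvChunks pvSuffix bp).headD [] = bp.takeWhile (· ≠ '$') := by
  induction bp with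
  | nil => simp [pvChunks]
  | cons c rest ih =>
    rw [pvChunks]
    by_cases hc : c = '$'
    · subst hc
      have hcond : pvSuffix ≠ [] ∧ pvSuffix.isPrefixOf ('$' :: rest) = true :=
        ⟨by simp [pvSuffix], by simp [pvSuffix, List.isPrefixOf]⟩
      rw [if_pos hcond]
      simp
    · have hif : ¬ (pvSuffix ≠ [] ∧ pvSuffix.isPrefixOf (c :: rest) = true) := by
        rintro ⟨-, h2⟩
        rw [List.isPrefixOf_iff_prefix, show pvSuffix = ['$'] from rfl] at h2
        exact hc (List.cons_prefix_cons.mp h2).1.symm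
      rw [if_neg hif]
      cases hr : pvChunks pvSuffix rest with
      | nil => exact absurd hr (pvChunks_ne_nil _ _)
      | cons p ps =>
        rw [hr] at ih
        simp only [List.headD_cons] at ih ⊢
        simp [hc, ih]

lemma pvIsIn_suffix (bp : List Char) : PySem.Chars.isIn pvSuffix bp = decide ('$' ∈ bp) := by
  by_cases h : '$' ∈ bp
  · obtain ⟨s, t, rfl⟩ := List.append_of_mem h
    rw [(PySem.Chars.isIn_iff_infix _ _).mpr ⟨s, t, by simp [pvSuffix]⟩, decide_eq_true h]
  · have hni : ¬ (pvSuffix <:+: bp) := fun hin => h (hin.subset (by simp [pvSuffix]))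
    rw [(PySem.Chars.isIn_eq_false_iff _ _).mpr hni, decide_eq_false h]

lemma pvChunks_no_occur (sep l : List Char) (h : ¬ sep <:+: l) :
    pvChunks sep l = [l] := by
  induction l with
  | nil => simp [pvChunks]
  | cons c rest ih =>
    rw [pvChunks]
    have hp : ¬ (sep.isPrefixOf (c :: rest) = true) := by
      rw [List.isPrefixOf_iff_prefix]
      exact fun hpp => h hpp.isInfix
    rw [if_neg (fun hh => hp hh.2)]
    rw [ih (fun hi => h (List.infix_cons hi))]

lemma pvFoldl_g (pieces : List (List Char)) (acc : List String) :
    pieces.foldl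
      (fun bpCodes bp =>
        if PySem.Chars.isIn pvSuffix bp = false then bpCodes
        else bpCodes ++ [String.ofList (pvPrefix ++ (PySem.Chars.splitOn bp pvSuffix).headD [] ++ pvSuffix)])
      acc
    = acc ++ pvG pieces := by
  induction pieces generalizing acc with
  | nil => simp [pvG]
  | cons bp rest ih =>
    simp only [List.foldl_cons]
    rw [ih, pvIsIn_suffix, pvSplitOn_eq pvSuffix (by simp [pvSuffix]) bp, pvChunks_head_suffix]
    by_cases h : '$' ∈ bp
    · simp [pvG, h]
    · simp [pvG, h]

def pvEmit (buf : List Char) : List (List Char) → List String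
  | [] => []
  | c0 :: rest =>
    (if '$' ∈ c0 then [String.ofList (pvPrefix ++ (buf ++ c0.takeWhile (· ≠ '$')) ++ pvSuffix)] else []) ++ pvG rest

lemma pvEmit_nil (ps : List (List Char)) : pvEmit [] ps = pvG ps := by
  cases ps <;> simp [pvEmit, pvG]

lemma pvMain : ∀ n (s : List Char), s.length ≤ n → ∀ buf, '$' ∉ buf →
    pvScan s false buf = pvG (pvChunks pvPrefix s).tail ∧
    pvScan s true buf = pvEmit buf (pvChunks pvPrefix s) := by
  intro n
  induction n with
  | zero =>
    intro s hs buf hbuf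
    have hnil : s = [] := List.eq_nil_of_length_eq_zero (by omega)
    subst hnil
    constructor <;> simp [pvScan, pvChunks, pvEmit, pvG]
  | succ n ih =>
    intro s hs buf hbuf
    cases s with
    | nil => constructor <;> simp [pvScan, pvChunks, pvEmit, pvG]
    | cons c rest =>
      by_cases hp : pvPrefix.isPrefixOf (c :: rest) = true
      · have hlen : ((c :: rest).drop pvPrefix.length).length ≤ n := by
          simp [pvPrefix] at hs ⊢; omega
        have ihd := ih _ hlen [] (by simp)
        rw [pvChunks, if_pos ⟨by simp [pvPrefix], hp⟩]
        constructor
        · rw [pvScan, if_pos hp, ihd.2, List.tail_cons, pvEmit_nil]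
        · rw [pvScan, if_pos hp, ihd.2, pvEmit_nil]
          simp [pvEmit]
      · have hlr : rest.length ≤ n := by simp at hs; omega
        have ihr := ih rest hlr
        rw [pvChunks, if_neg (fun hh => hp hh.2)]
        cases hr : pvChunks pvPrefix rest with
        | nil => exact absurd hr (pvChunks_ne_nil _ _)
        | cons p ps =>
          by_cases hc : c = '$'
          · subst hc
            constructor
            · rw [pvScan, if_neg hp]
              simp only [Bool.false_and, if_neg Bool.false_ne_true]
              rw [(ihr buf hbuf).1, hr, List.tail_cons, List.tail_cons]
            · rw [pvScan, if_neg hp]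
              simp only [beq_self_eq_true, Bool.and_self]
              rw [(ihr [] (by simp)).1, hr, List.tail_cons]
              simp [pvEmit]
          · constructor
            · rw [pvScan, if_neg hp]
              simp only [Bool.false_and, if_neg Bool.false_ne_true]
              rw [(ihr buf hbuf).1, hr, List.tail_cons, List.tail_cons]
            · rw [pvScan, if_neg hp]
              have hcb : (true && (c == '$')) = false := by simp [hc]
              rw [hcb, if_neg Bool.false_ne_true, if_pos rfl]
              have hbuf' : '$' ∉ buf ++ [c] := by
                simp [hbuf]; exact fun h => hc h.symm
              rw [(ihr (buf ++ [c]) hbuf').2, hr]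
              simp [pvEmit, hc, List.mem_cons, Ne.symm hc]

-- ===== VERDICT (by name: the statement is the Claim_ definition above) =====
theorem getPotentialBPCodesInString_spec : Claim_equal_getPotentialBPCodesInString := by
  intro s _
  unfold Spec_getPotentialBPCodesInString getPotentialBPCodesInString getPotentialBPCodesInString_alt
  rw [(pvMain s.toList.length s.toList le_rfl [] (by simp)).1]
  by_cases hin : PySem.Chars.isIn pvPrefix s.toList = false
  · rw [if_pos hin]
    have hnocc : ¬ pvPrefix <:+: s.toList := (PySem.Chars.isIn_eq_false_iff _ _).mp hin
    rw [pvChunks_no_occur _ _ hnocc]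
    simp [pvG]
  · rw [if_neg hin, pvSplitOn_eq pvPrefix (by simp [pvPrefix]) s.toList,
       PySem.List.slice_from _ (by omega), pvFoldl_g]
    simp
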